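-- pv_equiv track=rewrite | github.com/4Sight-platform/4Sight-ai-engine | onboarding/keyword_generation/keyword_analyzer.py | _estimate_intent_distribution
-- ===== SOURCE A (Python) =====
-- from typing import List, Dict, Any, Tuple
--
-- def _estimate_intent_distribution(keywords: List[str]) -> Dict[str, int]:
--     """Estimate distribution of search intent"""
--     distribution = {
--         "informational": 0,
--         "commercial": 0,
--         "transactional": 0,
--         "navigational": 0
--     }
--
--     for keyword in keywords:
--         kw_lower = keyword.lower()
--
--         if any(word in kw_lower for word in ['buy', 'purchase', 'order', 'book']):
--             distribution["transactional"] += 1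
--         elif any(word in kw_lower for word in ['price', 'cost', 'compare', 'review', 'best']):
--             distribution["commercial"] += 1
--         elif any(word in kw_lower for word in ['website', 'login', 'official']):
--             distribution["navigational"] += 1
--         else:
--             distribution["informational"] += 1
--
--     return distribution
-- ===== SOURCE B (Python) =====
-- def _estimate_intent_distribution(keywords):
--     """Estimate distribution of search intent"""
--     lows = [k.lower() for k in keywords]
--     trans = ('buy', 'purchase', 'order', 'book')
--     comm = ('price', 'cost', 'compare', 'review', 'best')
--     nav = ('website', 'login', 'official')
--
--     def m(kw, words):
--         return any(w in kw for w in words)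
--
--     t = sum(1 for kw in lows if m(kw, trans))
--     c = sum(1 for kw in lows if not m(kw, trans) and m(kw, comm))
--     v = sum(1 for kw in lows if not m(kw, trans) and not m(kw, comm) and m(kw, nav))
--     return {
--         "informational": len(keywords) - t - c - v,
--         "commercial": c,
--         "transactional": t,
--         "navigational": v,
--     }
-- ===== Notes on version B (the rewrite author's own statement) =====
-- stated objective: alternative
-- what changed: Replaces A's single fold that routes each keyword through an if/elif chain into a mutated dict by staged counting passes: count transactional matches, then commercial matches among non-transactional, then navigational among the rest, and derive informational arithmetically as len(keywords) minus the three counts.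
import Mathlib
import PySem

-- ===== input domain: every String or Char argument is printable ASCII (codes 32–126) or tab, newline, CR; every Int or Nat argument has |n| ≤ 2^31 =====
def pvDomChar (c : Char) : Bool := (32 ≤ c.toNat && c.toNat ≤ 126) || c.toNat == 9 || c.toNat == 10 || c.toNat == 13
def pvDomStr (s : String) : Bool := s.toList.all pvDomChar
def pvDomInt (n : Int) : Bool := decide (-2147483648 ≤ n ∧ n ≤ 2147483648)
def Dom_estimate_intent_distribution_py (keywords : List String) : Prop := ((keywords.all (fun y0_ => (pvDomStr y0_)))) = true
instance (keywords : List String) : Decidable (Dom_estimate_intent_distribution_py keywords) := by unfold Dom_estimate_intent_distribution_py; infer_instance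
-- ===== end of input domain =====

-- B replaces A's single dict-mutating fold by staged counting passes (count each category
-- independently with cumulative exclusions, informational by subtraction); objective: alternative.

-- ===== PORT A =====
-- one loop iteration of A: lowercase, if/elif chain, increment the matching key
def pvStepA (d : PySem.Dict String Int) (keyword : String) : PySem.Dict String Int :=
  let kw_lower := PySem.Str.lower keyword
  if ["buy", "purchase", "order", "book"].any (fun word => PySem.Str.isIn word kw_lower) then
    d.insert "transactional" (d.getD "transactional" 0 + 1)
  else if ["price", "cost", "compare", "review", "best"].any (fun word => PySem.Str.isIn word kw_lower) then
    d.insert "commercial" (d.getD "commercial" 0 + 1)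
  else if ["website", "login", "official"].any (fun word => PySem.Str.isIn word kw_lower) then
    d.insert "navigational" (d.getD "navigational" 0 + 1)
  else
    d.insert "informational" (d.getD "informational" 0 + 1)

def estimate_intent_distribution_py (keywords : List String) : List (String × Int) :=
  let distribution : PySem.Dict String Int :=
    PySem.Dict.ofList [("informational", 0), ("commercial", 0), ("transactional", 0), ("navigational", 0)]
  (keywords.foldl pvStepA distribution).items

-- ===== PORT B =====
-- m(kw, words) = any(w in kw for w in words)
def pvMatchB (kw : String) (words : List String) : Bool :=
  words.any (fun w => PySem.Str.isIn w kw)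

def estimate_intent_distribution_py_alt (keywords : List String) : List (String × Int) :=
  let lows := keywords.map PySem.Str.lower
  let trans := ["buy", "purchase", "order", "book"]
  let comm := ["price", "cost", "compare", "review", "best"]
  let nav := ["website", "login", "official"]
  let t : Int := lows.countP (fun kw => pvMatchB kw trans)
  let c : Int := lows.countP (fun kw => !pvMatchB kw trans && pvMatchB kw comm)
  let v : Int := lows.countP (fun kw => !pvMatchB kw trans && !pvMatchB kw comm && pvMatchB kw nav)
  [("informational", (keywords.length : Int) - t - c - v),
   ("commercial", c), ("transactional", t), ("navigational", v)]

-- ===== PRECONDITION & SPEC =====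
def Spec_estimate_intent_distribution_py (keywords : List String) (out : List (String × Int)) : Prop := out = estimate_intent_distribution_py_alt keywords
instance (keywords : List String) (out : List (String × Int)) : Decidable (Spec_estimate_intent_distribution_py keywords out) := by unfold Spec_estimate_intent_distribution_py; infer_instance

-- ===== CLAIM (what is proved, stated in full; the proofs are below) =====
def Claim_equal_estimate_intent_distribution_py : Prop := ∀ (keywords : List String), Dom_estimate_intent_distribution_py keywords → Spec_estimate_intent_distribution_py keywords (estimate_intent_distribution_py keywords)

-- ===== LEMMAS AND PROOFS =====
-- the four-key dict with given values
def pvMk4 (a b c d : Int) : PySem.Dict String Int :=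
  PySem.Dict.ofList [("informational", a), ("commercial", b), ("transactional", c), ("navigational", d)]

-- the three branch conditions on the raw keyword (lowered inside)
def pvC1 (x : String) : Bool := pvMatchB (PySem.Str.lower x) ["buy", "purchase", "order", "book"]
def pvC2 (x : String) : Bool := pvMatchB (PySem.Str.lower x) ["price", "cost", "compare", "review", "best"]
def pvC3 (x : String) : Bool := pvMatchB (PySem.Str.lower x) ["website", "login", "official"]

lemma pvMk4_ins_t (a b c d : Int) : (pvMk4 a b c d).insert "transactional" ((pvMk4 a b c d).getD "transactional" 0 + 1) = pvMk4 a b (c + 1) d := rfl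
lemma pvMk4_ins_c (a b c d : Int) : (pvMk4 a b c d).insert "commercial" ((pvMk4 a b c d).getD "commercial" 0 + 1) = pvMk4 a (b + 1) c d := rfl
lemma pvMk4_ins_n (a b c d : Int) : (pvMk4 a b c d).insert "navigational" ((pvMk4 a b c d).getD "navigational" 0 + 1) = pvMk4 a b c (d + 1) := rfl
lemma pvMk4_ins_i (a b c d : Int) : (pvMk4 a b c d).insert "informational" ((pvMk4 a b c d).getD "informational" 0 + 1) = pvMk4 (a + 1) b c d := rfl

lemma pvMk4_congr {a b c d a' b' c' d' : Int} (h1 : a = a') (h2 : b = b') (h3 : c = c') (h4 : d = d') :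
    pvMk4 a b c d = pvMk4 a' b' c' d' := by rw [h1, h2, h3, h4]

-- A's loop body on the four-key dict
lemma pvStep_eq (x : String) (a b c d : Int) : pvStepA (pvMk4 a b c d) x =
    if pvC1 x then pvMk4 a b (c + 1) d
    else if pvC2 x then pvMk4 a (b + 1) c d
    else if pvC3 x then pvMk4 a b c (d + 1)
    else pvMk4 (a + 1) b c d := by
  show (if pvC1 x then (pvMk4 a b c d).insert "transactional" ((pvMk4 a b c d).getD "transactional" 0 + 1)
        else if pvC2 x then (pvMk4 a b c d).insert "commercial" ((pvMk4 a b c d).getD "commercial" 0 + 1)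
        else if pvC3 x then (pvMk4 a b c d).insert "navigational" ((pvMk4 a b c d).getD "navigational" 0 + 1)
        else (pvMk4 a b c d).insert "informational" ((pvMk4 a b c d).getD "informational" 0 + 1)) = _
  rw [pvMk4_ins_t, pvMk4_ins_c, pvMk4_ins_n, pvMk4_ins_i]

-- B's three per-category predicates over raw keywords
def pvPT (x : String) : Bool := pvC1 x
def pvPC (x : String) : Bool := !pvC1 x && pvC2 x
def pvPN (x : String) : Bool := !pvC1 x && !pvC2 x && pvC3 x
def pvPI (x : String) : Bool := !pvC1 x && !pvC2 x && !pvC3 x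

-- the B-side counts, in terms of countP over the raw list
lemma pvSum (xs : List String) :
    xs.countP pvPT + xs.countP pvPC + xs.countP pvPN + xs.countP pvPI = xs.length := by
  induction xs with
  | nil => simp
  | cons x xs ih =>
    simp only [List.countP_cons, List.length_cons]
    by_cases h1 : pvC1 x = true <;> by_cases h2 : pvC2 x = true <;> by_cases h3 : pvC3 x = true <;>
      simp [pvPT, pvPC, pvPN, pvPI, h1, h2, h3] <;> omega

-- loop invariant: the fold adds the per-category counts to the accumulator
lemma pvMain (xs : List String) (a b c d : Int) :
    xs.foldl pvStepA (pvMk4 a b c d)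
      = pvMk4 (a + (xs.countP pvPI : Int)) (b + (xs.countP pvPC : Int))
              (c + (xs.countP pvPT : Int)) (d + (xs.countP pvPN : Int)) := by
  induction xs generalizing a b c d with
  | nil => simp
  | cons x xs ih =>
    rw [List.foldl_cons, pvStep_eq]
    by_cases h1 : pvC1 x
    · rw [if_pos h1, ih]
      apply pvMk4_congr <;> simp [pvPT, pvPC, pvPN, pvPI, h1] <;> ring
    · rw [if_neg h1]
      by_cases h2 : pvC2 x
      · rw [if_pos h2, ih]
        apply pvMk4_congr <;> simp [pvPT, pvPC, pvPN, pvPI, h1, h2] <;> ring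
      · rw [if_neg h2]
        by_cases h3 : pvC3 x
        · rw [if_pos h3, ih]
          apply pvMk4_congr <;> simp [pvPT, pvPC, pvPN, pvPI, h1, h2, h3] <;> ring
        · rw [if_neg h3, ih]
          apply pvMk4_congr <;> simp [pvPT, pvPC, pvPN, pvPI, h1, h2, h3] <;> ring

-- countP over the lowered list equals countP of the raw-keyword predicate
lemma pvCountLow (xs : List String) (p : String → Bool) :
    (xs.map PySem.Str.lower).countP p = xs.countP (fun x => p (PySem.Str.lower x)) := by
  rw [List.countP_map]; rfl

-- ===== VERDICT (by name: the statement is the Claim_ definition above) =====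
theorem estimate_intent_distribution_py_spec : Claim_equal_estimate_intent_distribution_py := by
  intro keywords _
  unfold Spec_estimate_intent_distribution_py estimate_intent_distribution_py estimate_intent_distribution_py_alt
  show (keywords.foldl pvStepA (pvMk4 0 0 0 0)).items = _
  rw [pvMain]
  simp only [pvCountLow]
  have hsum := pvSum keywords
  show [("informational", (0 : Int) + _), ("commercial", (0 : Int) + _),
        ("transactional", (0 : Int) + _), ("navigational", (0 : Int) + _)] = _
  have hT : keywords.countP (fun x => pvMatchB (PySem.Str.lower x) ["buy", "purchase", "order", "book"]) = keywords.countP pvPT := by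
    apply List.countP_congr; intro x _; simp [pvPT, pvC1]
  have hC : keywords.countP (fun x => !pvMatchB (PySem.Str.lower x) ["buy", "purchase", "order", "book"] && pvMatchB (PySem.Str.lower x) ["price", "cost", "compare", "review", "best"]) = keywords.countP pvPC := by
    apply List.countP_congr; intro x _; simp [pvPC, pvC1, pvC2]
  have hN : keywords.countP (fun x => !pvMatchB (PySem.Str.lower x) ["buy", "purchase", "order", "book"] && !pvMatchB (PySem.Str.lower x) ["price", "cost", "compare", "review", "best"] && pvMatchB (PySem.Str.lower x) ["website", "login", "official"]) = keywords.countP pvPN := by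
    apply List.countP_congr; intro x _; simp [pvPN, pvC1, pvC2, pvC3]
  rw [hT, hC, hN]
  have h4 : (keywords.countP pvPI : Int)
      = (keywords.length : Int) - keywords.countP pvPT - keywords.countP pvPC - keywords.countP pvPN := by
    omega
  simp only [zero_add, h4]
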